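-- pv_equiv track=rewrite | github.com/elh/advent-2023 | solutions/day05.py | is_valid_init_value
-- ===== SOURCE A (Python) =====
-- def is_valid_init_value(v: int, data: dict) -> bool:
--     l = 0
--     r = len(data["initial_ranges"])
--     while l < r:
--         i = (l + r) // 2
--         start, size = data["initial_ranges"][i]
--         if v >= start and v < start + size:
--             return True
--         elif v < start:
--             r = i
--         else:
--             l = i + 1
--     return False
-- ===== SOURCE B (Python) =====
-- def is_valid_init_value(v: int, data: dict) -> bool:
--     def rec(rs):
--         if not rs:
--             return False
--         i = len(rs) // 2
--         start, size = rs[i]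
--         if start <= v < start + size:
--             return True
--         return rec(rs[:i]) if v < start else rec(rs[i + 1:])
--     return rec(data["initial_ranges"])
-- ===== Notes on version B (the rewrite author's own statement) =====
-- stated objective: alternative
-- what changed: The iterative index-based binary search over (l, r) bounds is replaced by a recursive divide-and-conquer on list slices: rec takes the remaining sublist itself, probes its middle element, and recurses on rs[:i] or rs[i+1:], picking the exact same elements A probes.
import Mathlib
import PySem

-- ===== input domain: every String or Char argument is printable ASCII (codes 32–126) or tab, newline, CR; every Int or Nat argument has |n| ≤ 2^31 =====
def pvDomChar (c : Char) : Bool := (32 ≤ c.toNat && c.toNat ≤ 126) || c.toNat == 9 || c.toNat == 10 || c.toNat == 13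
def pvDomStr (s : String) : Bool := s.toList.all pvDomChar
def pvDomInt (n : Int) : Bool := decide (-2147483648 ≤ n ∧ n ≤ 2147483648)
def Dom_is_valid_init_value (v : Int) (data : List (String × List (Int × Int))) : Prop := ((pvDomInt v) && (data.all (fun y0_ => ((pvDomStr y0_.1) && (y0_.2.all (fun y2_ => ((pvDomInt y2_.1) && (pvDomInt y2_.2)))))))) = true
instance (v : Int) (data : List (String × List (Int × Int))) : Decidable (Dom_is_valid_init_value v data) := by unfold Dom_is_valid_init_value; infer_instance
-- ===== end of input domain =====

-- B replaces A's iterative (l, r)-bound binary search by a recursive divide-and-conquer on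
-- list slices, probing the same elements; alternative decomposition, no speed claim.

-- ===== PORT A =====
-- while l < r: i = (l+r)//2; probe ranges[i]; return True / shrink r to i / raise l to i+1.
def pvAGo (v : Int) (ranges : List (Int × Int)) (l r : Int) : Bool :=
  if h : l < r then
    let i := PySem.Int.floordiv (l + r) 2
    match PySem.List.pyGet? ranges i with
    | none => false  -- Python would raise IndexError; unreachable from is_valid_init_value's call
    | some (start, size) =>
      if v ≥ start ∧ v < start + size then true
      else if v < start then pvAGo v ranges l i
      else pvAGo v ranges (i + 1) r
  else false
termination_by (r - l).toNat
decreasing_by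
  · have h1 := (PySem.Int.le_floordiv_iff_mul_le (a := l + r) (b := 2) (q := l) (by omega)).mpr (by omega)
    have h2 := (PySem.Int.floordiv_lt_iff_lt_mul (a := l + r) (b := 2) (q := r) (by omega)).mpr (by omega)
    omega
  · have h1 := (PySem.Int.le_floordiv_iff_mul_le (a := l + r) (b := 2) (q := l) (by omega)).mpr (by omega)
    have h2 := (PySem.Int.floordiv_lt_iff_lt_mul (a := l + r) (b := 2) (q := r) (by omega)).mpr (by omega)
    omega

def is_valid_init_value (v : Int) (data : List (String × List (Int × Int))) : Bool :=
  match data.find? (fun p => p.1 == "initial_ranges") with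
  | none => false  -- Python raises KeyError here; excluded by Pre_
  | some (_, ranges) => pvAGo v ranges 0 (ranges.length : Int)

-- ===== PORT B =====
-- rec(rs): empty → False; probe the middle of rs; recurse on rs[:i] or rs[i+1:].
def pvBRec (v : Int) (rs : List (Int × Int)) : Bool :=
  if h : rs = [] then false
  else
    let i := rs.length / 2
    have hi : i < rs.length :=
      Nat.div_lt_self (List.length_pos_of_ne_nil h) (by omega)
    let (start, size) := rs[i]
    if start ≤ v ∧ v < start + size then true
    else if v < start then pvBRec v (rs.take i)
    else pvBRec v (rs.drop (i + 1))
termination_by rs.length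
decreasing_by
  · simp [List.length_take]; omega
  · simp [List.length_drop]; omega

def is_valid_init_value_alt (v : Int) (data : List (String × List (Int × Int))) : Bool :=
  match data.find? (fun p => p.1 == "initial_ranges") with
  | none => false  -- Python raises KeyError here; excluded by Pre_
  | some (_, ranges) => pvBRec v ranges

-- ===== PRECONDITION & SPEC =====
-- Pre_ excludes exactly the dicts with no "initial_ranges" key, on which Python A raises KeyError.
def Pre_is_valid_init_value (v : Int) (data : List (String × List (Int × Int))) : Prop :=
  "initial_ranges" ∈ data.map Prod.fst
instance (v : Int) (data : List (String × List (Int × Int))) : Decidable (Pre_is_valid_init_value v data) := by unfold Pre_is_valid_init_value; infer_instance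

def pvWitness_is_valid_init_value : Int × (List (String × List (Int × Int))) :=
  (5, [("initial_ranges", [(3, 4), (10, 2)])])

def Spec_is_valid_init_value (v : Int) (data : List (String × List (Int × Int))) (out : Bool) : Prop := out = is_valid_init_value_alt v data
instance (v : Int) (data : List (String × List (Int × Int))) (out : Bool) : Decidable (Spec_is_valid_init_value v data out) := by unfold Spec_is_valid_init_value; infer_instance

-- ===== CLAIM (what is proved, stated in full; the proofs are below) =====
def Claim_equal_is_valid_init_value : Prop := ∀ (v : Int) (data : List (String × List (Int × Int))), Dom_is_valid_init_value v data → Pre_is_valid_init_value v data → Spec_is_valid_init_value v data (is_valid_init_value v data)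

-- ===== LEMMAS AND PROOFS =====

-- Core invariant: A's loop on bounds (l, r) computes B's recursion on the slice ranges[l:r].
theorem pvAGo_eq_pvBRec (v : Int) (ranges : List (Int × Int)) :
    ∀ (n : Nat) (l r : Int), (r - l).toNat ≤ n → 0 ≤ l → r ≤ (ranges.length : Int) →
      pvAGo v ranges l r = pvBRec v ((ranges.drop l.toNat).take (r - l).toNat) := by
  intro n
  induction n with
  | zero =>
    intro l r hn h0 hr
    have hlr : ¬ l < r := by omega
    rw [pvAGo, dif_neg hlr]
    have : (r - l).toNat = 0 := by omega
    rw [this]; simp [pvBRec]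
  | succ n ih =>
    intro l r hn h0 hr
    by_cases hlr : l < r
    · have h1 := (PySem.Int.le_floordiv_iff_mul_le (a := l + r) (b := 2) (q := l) (by omega)).mpr (by omega)
      have h2 := (PySem.Int.floordiv_lt_iff_lt_mul (a := l + r) (b := 2) (q := r) (by omega)).mpr (by omega)
      set i := PySem.Int.floordiv (l + r) 2 with hi
      have hinn : 0 ≤ i := by omega
      have hilen : i.toNat < ranges.length := by omega
      -- i as the midpoint of the slice
      have hmid : l.toNat + (r - l).toNat / 2 = i.toNat := by
        have := PySem.Int.floordiv_eq_ediv_of_pos (a := l + r) (show (0:Int) < 2 by norm_num)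
        omega
      set sub := (ranges.drop l.toNat).take (r - l).toNat with hsub
      have hsublen : sub.length = (r - l).toNat := by
        simp [hsub, List.length_take, List.length_drop]; omega
      have hsubne : sub ≠ [] := by
        intro hnil; rw [hnil] at hsublen; simp at hsublen; omega
      have hj : sub.length / 2 = (r - l).toNat / 2 := by rw [hsublen]
      have hjlt : sub.length / 2 < sub.length := Nat.div_lt_self (List.length_pos_of_ne_nil hsubne) (by omega)
      have hget : sub[sub.length / 2]'hjlt = ranges[i.toNat]'hilen := by
        simp only [hsub, List.getElem_take, List.getElem_drop]
        congr 1
        rw [hj, hmid]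
      have hA : PySem.List.pyGet? ranges i = ranges[i.toNat]? := by
        conv_lhs => rw [show i = ((i.toNat : Nat) : Int) by omega]
        rw [PySem.List.pyGet?_natCast]
      have hA' : PySem.List.pyGet? ranges i = some (ranges[i.toNat]'hilen) :=
        hA.trans (List.getElem?_eq_getElem hilen)
      rw [pvAGo, dif_pos hlr]
      rw [pvBRec, dif_neg hsubne]
      simp only [← hi, hA']
      rcases hel : (ranges[i.toNat]'hilen) with ⟨start, size⟩
      simp only [List.get_eq_getElem, hget, hel]
      by_cases hin : start ≤ v ∧ v < start + size
      · simp [hin, ge_iff_le]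
      · simp only [if_neg hin]
        by_cases hlt : v < start
        · simp only [if_pos hlt]
          -- left half: ranges[l:i] = sub.take (sub.length / 2)
          have hL := ih l i (by omega) h0 (by omega)
          rw [hL]
          congr 1
          rw [hsub, List.take_take]
          congr 1
          simp only [List.length_take, List.length_drop]
          omega
        · simp only [if_neg hlt]
          -- right half: ranges[i+1:r] = sub.drop (sub.length / 2 + 1)
          have hR := ih (i + 1) r (by omega) (by omega) hr
          rw [hR]
          rw [hsub, List.drop_take, List.drop_drop]
          congr 1
          congr 1
          · simp only [List.length_take, List.length_drop]
            omega
          · congr 1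
            simp only [List.length_take, List.length_drop]
            omega
    · rw [pvAGo, dif_neg hlr]
      have : (r - l).toNat = 0 := by omega
      rw [this]; simp [pvBRec]

-- ===== VERDICT (by name: the statement is the Claim_ definition above) =====
theorem is_valid_init_value_spec : Claim_equal_is_valid_init_value := by
  intro v data _hdom _hpre
  unfold Spec_is_valid_init_value is_valid_init_value is_valid_init_value_alt
  cases hfind : data.find? (fun p => p.1 == "initial_ranges") with
  | none => rfl
  | some p =>
    obtain ⟨_, ranges⟩ := p
    have := pvAGo_eq_pvBRec v ranges (ranges.length) 0 (ranges.length : Int)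
      (by omega) (by omega) (by omega)
    simpa using this
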